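-- pv_equiv track=rewrite | github.com/benthamite/stafforini.com | scripts/write-quotes-to-org.py | escape_org_text
-- ===== SOURCE A (Python) =====
-- def escape_org_text(text: str) -> str:
--     """Escape text for safe inclusion in an org-mode quote block."""
--     lines = text.split("\n")
--     escaped = []
--     for line in lines:
--         # Escape * at line start (would be interpreted as heading)
--         if line.startswith("*"):
--             line = "\u200B" + line  # zero-width space prefix
--         # Escape #+ sequences that look like org keywords
--         if line.startswith("#+"):
--             line = "\u200B" + line
--         escaped.append(line)
--     return "\n".join(escaped)
-- ===== SOURCE B (Python) =====
-- def escape_org_text(text: str) -> str: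
--     """Escape text for safe inclusion in an org-mode quote block."""
--     out = []
--     bol = True  # at beginning of a line?
--     for i, c in enumerate(text):
--         if bol and (c == "*" or (c == "#" and i + 1 < len(text) and text[i + 1] == "+")):
--             out.append("\u200B")
--         out.append(c)
--         bol = c == "\n"
--     return "".join(out)
-- ===== Notes on version B (the rewrite author's own statement) =====
-- stated objective: alternative
-- what changed: Replaced split-into-lines / per-line startswith tests / join with a single character-level scan that tracks a beginning-of-line flag and inserts the zero-width space in place, using one-character lookahead for the keyword prefix.
import Mathlib
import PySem

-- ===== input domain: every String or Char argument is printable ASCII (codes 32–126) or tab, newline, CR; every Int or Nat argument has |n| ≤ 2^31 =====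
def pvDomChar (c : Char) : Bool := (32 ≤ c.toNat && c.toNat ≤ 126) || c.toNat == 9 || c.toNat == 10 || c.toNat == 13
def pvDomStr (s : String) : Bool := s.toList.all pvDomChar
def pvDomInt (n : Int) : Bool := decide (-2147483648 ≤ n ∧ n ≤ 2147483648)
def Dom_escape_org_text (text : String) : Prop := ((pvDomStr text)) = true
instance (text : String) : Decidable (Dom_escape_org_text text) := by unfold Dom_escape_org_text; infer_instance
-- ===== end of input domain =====

-- B replaces A's split/per-line-test/join pipeline by a single character scan with a
-- beginning-of-line flag and one-character lookahead (objective: alternative, same cost).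

-- ===== PORT A =====
def escape_org_text (text : String) : String :=
  let lines := PySem.Chars.splitOn text.toList ['\n']
  let escaped := lines.foldl (fun acc line =>
    let line1 := if PySem.Chars.startswith line ['*'] then '\u200B' :: line else line
    let line2 := if PySem.Chars.startswith line1 ['#', '+'] then '\u200B' :: line1 else line1
    acc ++ [line2]) []
  String.mk (PySem.Chars.join ['\n'] escaped)

-- ===== PORT B =====
-- scan with bol flag; 'rest.head?' is Source B's lookahead text[i+1]
def altGo (bol : Bool) : List Char → List Char
  | [] => []
  | c :: rest =>
    if bol && (c == '*' || (c == '#' && rest.head? == some '+')) then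
      '\u200B' :: c :: altGo (c == '\n') rest
    else
      c :: altGo (c == '\n') rest

def escape_org_text_alt (text : String) : String :=
  String.mk (altGo true text.toList)

-- ===== PRECONDITION & SPEC =====
def Spec_escape_org_text (text : String) (out : String) : Prop := out = escape_org_text_alt text
instance (text : String) (out : String) : Decidable (Spec_escape_org_text text out) := by unfold Spec_escape_org_text; infer_instance

-- ===== CLAIM (what is proved, stated in full; the proofs are below) =====
def Claim_equal_escape_org_text : Prop := ∀ (text : String), Dom_escape_org_text text → Spec_escape_org_text text (escape_org_text text)

-- ===== LEMMAS AND PROOFS =====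

-- split2 cs = (first line of cs, remaining lines): functional characterisation of split('\n')
def split2 : List Char → List Char × List (List Char)
  | [] => ([], [])
  | c :: cs =>
    let p := split2 cs
    if c = '\n' then ([], p.1 :: p.2) else (c :: p.1, p.2)

-- A's per-line body, in the combined one-condition form
def esc : List Char → List Char
  | [] => []
  | c :: r =>
    if c == '*' || (c == '#' && r.head? == some '+') then '\u200B' :: c :: r else c :: r

lemma go_spec : ∀ (fuel : Nat) (l cur : List Char) (acc : List (List Char)),
    l.length < fuel →
    PySem.Chars.splitOn.go ['\n'] fuel l cur acc
      = acc.reverse ++ ((cur.reverse ++ (split2 l).1) :: (split2 l).2) := by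
  intro fuel
  induction fuel with
  | zero => intro l cur acc h; omega
  | succ f ih =>
    intro l cur acc h
    cases l with
    | nil => simp [PySem.Chars.splitOn.go, split2]
    | cons c rest =>
      by_cases hc : c = '\n'
      · subst hc
        rw [PySem.Chars.splitOn.go]
        have hp : (['\n'].isPrefixOf ('\n' :: rest)) = true := by simp [List.isPrefixOf]
        rw [if_pos hp]
        have hd : List.drop ['\n'].length ('\n' :: rest) = rest := rfl
        rw [hd, ih rest [] _ (by simpa using Nat.lt_of_succ_lt_succ h)]
        simp [split2]
      · rw [PySem.Chars.splitOn.go]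
        have hp : (['\n'].isPrefixOf (c :: rest)) = false := by
          simp [List.isPrefixOf]; exact Ne.symm hc
        rw [hp]
        simp only [Bool.false_eq_true, if_false]
        rw [ih rest (c :: cur) acc (by simpa using Nat.lt_of_succ_lt_succ h)]
        simp [split2, hc]

lemma splitOn_eq (cs : List Char) :
    PySem.Chars.splitOn cs ['\n'] = (split2 cs).1 :: (split2 cs).2 := by
  unfold PySem.Chars.splitOn
  rw [go_spec (cs.length + 1) cs [] [] (by omega)]
  simp

-- A's two sequential startswith tests equal the one combined condition of esc
lemma escA_eq (line : List Char) :
    (let line1 := if PySem.Chars.startswith line ['*'] then '\u200B' :: line else line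
     let line2 := if PySem.Chars.startswith line1 ['#', '+'] then '\u200B' :: line1 else line1
     line2) = esc line := by
  cases line with
  | nil => simp [PySem.Chars.startswith, List.isPrefixOf, esc]
  | cons c r =>
    by_cases h1 : c = '*'
    · subst h1
      simp [PySem.Chars.startswith, List.isPrefixOf, esc]
    · by_cases h2 : c = '#'
      · subst h2
        cases r with
        | nil => simp [PySem.Chars.startswith, List.isPrefixOf, esc]
        | cons d r' =>
          by_cases h3 : d = '+'
          · subst h3; simp [PySem.Chars.startswith, List.isPrefixOf, esc]
          · simp [PySem.Chars.startswith, List.isPrefixOf, esc, h3, Ne.symm h3]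
      · simp [PySem.Chars.startswith, List.isPrefixOf, esc, h1, h2, Ne.symm h1, Ne.symm h2]

-- the first line of cs starts with '+' iff cs does ('\n' is not '+')
lemma head_split2 (cs : List Char) :
    ((split2 cs).1.head? == some '+') = (cs.head? == some '+') := by
  cases cs with
  | nil => rfl
  | cons c rest =>
    by_cases hc : c = '\n'
    · subst hc; simp [split2]
    · simp [split2, hc]

lemma join_cons_char (sep : List Char) (c : Char) (h : List Char) (t : List (List Char)) :
    PySem.Chars.join sep ((c :: h) :: t) = c :: PySem.Chars.join sep (h :: t) := by
  cases t with
  | nil => simp [PySem.Chars.join_singleton]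
  | cons q rest => simp [PySem.Chars.join_cons_cons]

lemma key : ∀ (cs : List Char) (b : Bool),
    altGo b cs
      = PySem.Chars.join ['\n']
          ((if b then esc (split2 cs).1 else (split2 cs).1) :: (split2 cs).2.map esc) := by
  intro cs
  induction cs with
  | nil =>
    intro b
    cases b <;> simp [altGo, split2, esc, PySem.Chars.join_singleton]
  | cons c rest ih =>
    intro b
    by_cases hc : c = '\n'
    · subst hc
      rw [altGo]
      simp only [show (('\n' : Char) == '*') = false from rfl,
        show (('\n' : Char) == '#') = false from rfl,
        show (('\n' : Char) == '\n') = true from rfl,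
        Bool.false_and, Bool.or_false, Bool.and_false, Bool.false_eq_true, if_false]
      rw [ih true]
      have hsplit : split2 ('\n' :: rest) = ([], (split2 rest).1 :: (split2 rest).2) := by
        simp [split2]
      rw [hsplit]
      have h0 : (if b then esc [] else ([] : List Char)) = [] := by cases b <;> simp [esc]
      simp only [List.map_cons]
      rw [h0, PySem.Chars.join_cons_cons]
      simp
    · have hsplit : split2 (c :: rest) = (c :: (split2 rest).1, (split2 rest).2) := by
        simp [split2, hc]
      have hbol : (c == '\n') = false := by simp [hc]
      rw [altGo, hsplit, hbol, ih false]
      simp only [Bool.false_eq_true, if_false]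
      by_cases hcond : (c == '*' || (c == '#' && rest.head? == some '+')) = true
      · have hesc : esc (c :: (split2 rest).1) = '\u200B' :: c :: (split2 rest).1 := by
          simp only [esc, head_split2, hcond, if_true]
        cases b
        · simp only [Bool.false_and, Bool.false_eq_true, if_false]
          rw [join_cons_char]
        · simp only [Bool.true_and, hcond, if_true, hesc]
          rw [join_cons_char, join_cons_char]
      · rw [Bool.not_eq_true] at hcond
        have hesc : esc (c :: (split2 rest).1) = c :: (split2 rest).1 := by
          simp only [esc, head_split2, hcond, Bool.false_eq_true, if_false]
        cases b
        · simp only [Bool.false_and, Bool.false_eq_true, if_false]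
          rw [join_cons_char]
        · simp only [Bool.true_and, hcond, Bool.false_eq_true, if_false, hesc, ite_self]
          rw [join_cons_char]

-- ===== VERDICT (by name: the statement is the Claim_ definition above) =====
theorem escape_org_text_spec : Claim_equal_escape_org_text := by
  intro text _
  unfold Spec_escape_org_text escape_org_text escape_org_text_alt
  simp only [splitOn_eq]
  rw [PySem.List.foldl_append_singleton_eq_map]
  have hmap : ∀ (l : List (List Char)),
      l.map (fun line =>
        let line1 := if PySem.Chars.startswith line ['*'] then '\u200B' :: line else line
        let line2 := if PySem.Chars.startswith line1 ['#', '+'] then '\u200B' :: line1 else line1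
        line2) = l.map esc := by
    intro l
    apply List.map_congr_left
    intro a _
    exact escA_eq a
  rw [hmap]
  rw [key text.toList true]
  simp
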